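-- pv_equiv track=rewrite | github.com/bmdundar24/assignments | metin_sigdirma.py | bosluk
-- ===== SOURCE A (Python) =====
-- def bosluk(text, n):
--     x = text.count(' ')
--     if x != 0:
--         liste = [0 for i in range(x)]
--         a, b, c, text_2 = 0, 0, 0, ''
--         while a < n:
--             liste[b] += 1
--             a += 1
--             b += 1
--             if b == x: b = 0
--         for i in text:
--             if i == ' ':
--                 text_2 += i + ' ' * liste[c]
--                 c += 1
--             else: text_2 += i
--     else: text_2 = text
--     return text_2
-- ===== SOURCE B (Python) =====
-- def bosluk(text, n):
--     x = text.count(' ')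
--     if x == 0:
--         return text
--     q, r = divmod(n, x)
--     out = []
--     c = 0
--     for ch in text:
--         if ch == ' ':
--             out.append(ch + ' ' * (q + (1 if c < r else 0)))
--             c += 1
--         else:
--             out.append(ch)
--     return ''.join(out)
-- ===== Notes on version B (the rewrite author's own statement) =====
-- stated objective: faster
-- what changed: Replaces A's auxiliary per-space counter array filled by an n-iteration round-robin while-loop with the closed-form share n//x + (1 if c < n%x else 0) computed directly in a single pass over the text.
import Mathlib
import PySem

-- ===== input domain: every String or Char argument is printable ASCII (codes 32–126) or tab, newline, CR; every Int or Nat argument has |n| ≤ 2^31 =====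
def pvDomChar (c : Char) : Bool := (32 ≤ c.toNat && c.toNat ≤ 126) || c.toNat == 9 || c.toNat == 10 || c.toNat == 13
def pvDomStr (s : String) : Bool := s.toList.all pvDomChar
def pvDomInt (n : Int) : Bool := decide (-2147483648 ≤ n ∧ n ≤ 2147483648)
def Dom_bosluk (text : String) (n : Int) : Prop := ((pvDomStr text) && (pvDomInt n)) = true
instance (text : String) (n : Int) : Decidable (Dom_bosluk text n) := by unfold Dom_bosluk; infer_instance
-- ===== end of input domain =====

-- B replaces A's n-step round-robin while-loop and auxiliary array by the closed-form
-- per-space share n//x + (1 if c < n%x else 0) computed in one pass (objective: faster).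

-- ===== PORT A =====
-- the 'while a < n' loop: a starts at 0 and increases by 1, so it runs n.toNat times
def boslukWhile (liste : List Int) (b x : Nat) : Nat → List Int
  | 0 => liste
  | fuel+1 =>
    let liste' := liste.set b (liste.getD b 0 + 1)
    let b' := b + 1
    let b' := if b' = x then 0 else b'
    boslukWhile liste' b' x fuel

-- the 'for i in text' loop; liste.getD c 0 is liste[c] (c < liste.length whenever read,
-- since c counts the spaces seen and liste has one slot per space of text)
def boslukFor (liste : List Int) : List Char → Nat → List Char → List Char
  | [], _, acc => acc
  | i :: rest, c, acc =>
    if i = ' ' then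
      boslukFor liste rest (c+1) (acc ++ i :: List.replicate (liste.getD c 0).toNat ' ')
    else boslukFor liste rest c (acc ++ [i])

def bosluk (text : String) (n : Int) : String :=
  let x := PySem.Str.count text " "
  if x ≠ 0 then
    let liste := List.replicate x (0 : Int)
    String.ofList (boslukFor (boslukWhile liste 0 x n.toNat) text.toList 0 [])
  else text

-- ===== PORT B =====
-- one pass over the characters; ' ' * k on a possibly negative k is replicate k.toNat
def boslukAltGo (q r : Int) : List Char → Nat → List Char
  | [], _ => []
  | ch :: rest, c =>
    if ch = ' ' then
      (ch :: List.replicate (q + if (c : Int) < r then 1 else 0).toNat ' ') ++ boslukAltGo q r rest (c+1)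
    else ch :: boslukAltGo q r rest c

def bosluk_alt (text : String) (n : Int) : String :=
  let x := PySem.Str.count text " "
  if x = 0 then text
  else String.ofList (boslukAltGo (PySem.Int.floordiv n x) (PySem.Int.mod n x) text.toList 0)

-- ===== PRECONDITION & SPEC =====
def Spec_bosluk (text : String) (n : Int) (out : String) : Prop := out = bosluk_alt text n
instance (text : String) (n : Int) (out : String) : Decidable (Spec_bosluk text n out) := by unfold Spec_bosluk; infer_instance

-- ===== CLAIM (what is proved, stated in full; the proofs are below) =====
def Claim_equal_bosluk : Prop := ∀ (text : String) (n : Int), Dom_bosluk text n → Spec_bosluk text n (bosluk text n)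

-- ===== LEMMAS AND PROOFS =====

-- str.count of the single-character pattern " " is the character count
lemma go_space : ∀ (l : List Char) (fuel acc : Nat), l.length ≤ fuel →
    PySem.Chars.count.go [' '] fuel l acc = acc + l.count ' ' := by
  intro l
  induction l with
  | nil => intro fuel acc _; cases fuel <;> simp [PySem.Chars.count.go]
  | cons h t ih =>
    intro fuel acc hle
    match fuel, hle with
    | f + 1, hle =>
      rw [PySem.Chars.count.go]
      by_cases hh : h = ' '
      · rw [if_pos (by simp [List.isPrefixOf, hh])]
        simp only [List.length_cons] at hle
        simp only [List.length_singleton, List.drop_one, List.tail_cons]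
        rw [ih f (acc + 1) (by omega)]
        simp [hh]
        omega
      · rw [if_neg (by simp [List.isPrefixOf]; intro h'; exact hh h'.symm)]
        simp only [List.length_cons] at hle
        rw [ih f acc (by omega)]
        simp [hh]

lemma str_count_space (s : String) : PySem.Str.count s " " = s.toList.count ' ' := by
  rw [PySem.Str.count]
  show PySem.Chars.count s.toList [' '] = _
  rw [PySem.Chars.count]
  rw [if_neg (by simp)]
  rw [go_space s.toList s.toList.length 0 le_rfl]
  omega

-- after the while-loop, slot i holds its old value plus the number of steps that hit it
lemma boslukWhile_getD (x : Nat) (hx : 0 < x) :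
    ∀ (fuel : Nat) (liste : List Int) (b : Nat), liste.length = x → b < x →
    ∀ i, i < x →
    (boslukWhile liste b x fuel).getD i 0
      = liste.getD i 0 + ((List.range fuel).countP (fun j => decide ((b + j) % x = i)) : Int) := by
  intro fuel
  induction fuel with
  | zero => intro liste b _ _ i _; simp [boslukWhile]
  | succ f ih =>
    intro liste b hlen hb i hi
    rw [boslukWhile]
    have hb' : (if b + 1 = x then 0 else b + 1) < x := by split <;> omega
    have hlen' : (liste.set b (liste.getD b 0 + 1)).length = x := by simp [hlen]
    rw [ih _ _ hlen' hb' i hi]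
    have hset : (liste.set b (liste.getD b 0 + 1)).getD i 0
        = liste.getD i 0 + (if b = i then 1 else 0) := by
      simp only [List.getD_eq_getElem?_getD, List.getElem?_set]
      split
      · next hbi =>
        subst hbi
        have : b < liste.length := by omega
        simp [this, List.getElem?_eq_getElem this]
      · simp
    rw [hset]
    have hshift : ((List.range (f+1)).countP (fun j => decide ((b + j) % x = i)) : Int)
        = (if b = i then 1 else 0)
          + ((List.range f).countP (fun j => decide (((if b + 1 = x then 0 else b + 1) + j) % x = i)) : Int) := by
      rw [List.range_succ_eq_map, List.countP_cons, List.countP_map]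
      have h1 : (decide ((b + 0) % x = i) : Bool) = decide (b = i) := by
        simp [Nat.mod_eq_of_lt hb]
      have h2 : ((fun j => decide ((b + j) % x = i)) ∘ Nat.succ)
          = (fun j => decide (((if b + 1 = x then 0 else b + 1) + j) % x = i)) := by
        funext j
        have : (b + (j + 1)) % x = ((if b + 1 = x then 0 else b + 1) + j) % x := by
          split
          · next h => rw [show b + (j+1) = j + x by omega]; simp [Nat.add_mod_right]
          · ring_nf
        simp only [Function.comp, Nat.succ_eq_add_one, this]
      rw [h1, h2]
      push_cast
      split <;> simp <;> ring
    rw [hshift]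
    ring

-- round-robin count in closed form
lemma range_countP_mod (x i : Nat) (hx : 0 < x) (hi : i < x) :
    ∀ fuel, (List.range fuel).countP (fun j => decide (j % x = i))
      = fuel / x + (if i < fuel % x then 1 else 0) := by
  intro fuel
  induction fuel with
  | zero => simp [Nat.not_lt_of_le (Nat.zero_le i)]
  | succ f ih =>
    rw [List.range_succ, List.countP_append, ih]
    have hc1 : (List.countP (fun j => decide (j % x = i)) [f] : Nat) = if f % x = i then 1 else 0 := by
      simp [List.countP_cons]
    rw [hc1]
    by_cases hdvd : x ∣ f + 1
    · have hmod0 : (f + 1) % x = 0 := Nat.mod_eq_zero_of_dvd hdvd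
      have hdiv : (f + 1) / x = f / x + 1 := by rw [Nat.succ_div, if_pos hdvd]
      have hfm : f % x = x - 1 := by
        obtain ⟨k, hk⟩ := hdvd
        match k, hk with
        | k' + 1, hk =>
          have hf : f = x * k' + (x - 1) := by
            have : x * (k' + 1) = x * k' + x := by ring
            omega
          rw [hf, Nat.mul_add_mod]
          exact Nat.mod_eq_of_lt (by omega)
      rw [hmod0, hdiv, hfm]
      split_ifs <;> omega
    · have hdiv : (f + 1) / x = f / x := by rw [Nat.succ_div, if_neg hdvd]; omega
      have hne : f % x + 1 ≠ x := by
        intro h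
        refine hdvd ⟨f / x + 1, ?_⟩
        have h1 := Nat.div_add_mod f x
        rw [Nat.mul_add]
        omega
      have hlt : f % x + 1 < x := by have := Nat.mod_lt f hx; omega
      have hmod : (f + 1) % x = f % x + 1 := by
        have h1 := Nat.div_add_mod f x
        rw [show f + 1 = x * (f / x) + (f % x + 1) by omega, Nat.mul_add_mod]
        exact Nat.mod_eq_of_lt hlt
      rw [hdiv, hmod]
      split_ifs <;> omega

-- B's per-space share agrees with A's slot value
lemma share_eq (n : Int) (x c : Nat) (hx : 0 < x) (hc : c < x) :
    (PySem.Int.floordiv n x + if (c : Int) < PySem.Int.mod n x then 1 else 0).toNat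
      = n.toNat / x + (if c < n.toNat % x then 1 else 0) := by
  by_cases hn : 0 ≤ n
  · have hcast : n = ((n.toNat : Nat) : Int) := by omega
    rw [hcast, PySem.Int.floordiv_natCast, PySem.Int.mod_natCast, Int.toNat_natCast]
    split
    · next h =>
      rw [if_pos (by exact_mod_cast h)]
      generalize n.toNat / x = m
      omega
    · next h =>
      rw [if_neg (by exact_mod_cast h)]
      generalize n.toNat / x = m
      omega
  · have hx' : (0 : Int) < x := by exact_mod_cast hx
    have hrel := PySem.Int.floordiv_mul_add_mod n x
    have hmodlt : PySem.Int.mod n x < x := by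
      rw [PySem.Int.mod_eq_emod_of_pos hx']
      exact Int.emod_lt_of_pos n hx'
    have hmodge : 0 ≤ PySem.Int.mod n x := by
      rw [PySem.Int.mod_eq_emod_of_pos hx']
      exact Int.emod_nonneg n (by omega)
    have hq : PySem.Int.floordiv n x ≤ -1 := by
      by_contra h
      have hq0 : 0 ≤ PySem.Int.floordiv n x := by omega
      have : 0 ≤ PySem.Int.floordiv n x * x := mul_nonneg hq0 (le_of_lt hx')
      omega
    have htn : n.toNat = 0 := by omega
    rw [htn]
    have hval : PySem.Int.floordiv n ↑x + (if (c : Int) < PySem.Int.mod n ↑x then 1 else 0) ≤ 0 := by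
      split <;> omega
    rw [Int.toNat_of_nonpos hval]
    simp

lemma boslukFor_acc (liste : List Int) :
    ∀ (cs : List Char) (c : Nat) (acc : List Char),
      boslukFor liste cs c acc = acc ++ boslukFor liste cs c [] := by
  intro cs
  induction cs with
  | nil => intro c acc; simp [boslukFor]
  | cons i rest ih =>
    intro c acc
    by_cases hi : i = ' '
    · rw [boslukFor, boslukFor, if_pos hi, if_pos hi, ih, ih ((c+1)) (([] : List Char) ++ _)]
      simp
    · rw [boslukFor, boslukFor, if_neg hi, if_neg hi, ih, ih c (([] : List Char) ++ _)]
      simp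

lemma fold_eq (x : Nat) (hx : 0 < x) (liste : List Int) (q r : Int)
    (h : ∀ c, c < x → (liste.getD c 0).toNat = (q + if (c : Int) < r then 1 else 0).toNat) :
    ∀ (cs : List Char) (c : Nat), c + cs.count ' ' = x →
      boslukFor liste cs c [] = boslukAltGo q r cs c := by
  intro cs
  induction cs with
  | nil => intro c _; simp [boslukFor, boslukAltGo]
  | cons i rest ih =>
    intro c hcount
    by_cases hi : i = ' '
    · have hc : c < x := by
        have : 1 ≤ (i :: rest).count ' ' := by
          simp [hi]
        omega
      have hrest : (c + 1) + rest.count ' ' = x := by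
        have : (i :: rest).count ' ' = rest.count ' ' + 1 := by simp [hi]
        omega
      rw [boslukFor, boslukAltGo, if_pos hi, if_pos hi, boslukFor_acc, ih (c+1) hrest,
        h c hc, hi]
      simp
    · have hrest : c + rest.count ' ' = x := by
        have : (i :: rest).count ' ' = rest.count ' ' := by simp [hi]
        omega
      rw [boslukFor, boslukAltGo, if_neg hi, if_neg hi, boslukFor_acc, ih c hrest]
      simp

-- ===== VERDICT (by name: the statement is the Claim_ definition above) =====
theorem bosluk_spec : Claim_equal_bosluk := by
  intro text n _
  unfold Spec_bosluk bosluk bosluk_alt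
  simp only [str_count_space]
  set x := text.toList.count ' ' with hxdef
  by_cases hx : x = 0
  · simp [hx]
  · have hxpos : 0 < x := Nat.pos_of_ne_zero hx
    simp only [hx, ne_eq, not_false_eq_true, if_pos]
    congr 1
    apply fold_eq x hxpos _ _ _ _ text.toList 0 (by simpa using hxdef.symm)
    intro c hc
    rw [boslukWhile_getD x hxpos n.toNat _ 0 (by simp) hxpos c hc]
    simp only [zero_add]
    rw [range_countP_mod x c hxpos hc n.toNat, share_eq n x c hxpos hc]
    have h0 : (List.replicate x (0 : Int)).getD c 0 = 0 := by
      simp [List.getD_eq_getElem?_getD, hc]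
    rw [h0]; simp only [zero_add, Int.toNat_natCast]
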